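-- pv_equiv track=rewrite | github.com/henmitch/advent | 2022/code/day08_0.py | visible_from_top
-- ===== SOURCE A (Python) =====
-- def visible_from_top(data: list[list[int]]) -> list[list[bool]]:
--     out = [len(data[0])*[True]]
--     max_so_far = data[0].copy()
--     for row in data[1:]:
--         new_row = []
--         for j, value in enumerate(row):
--             new_row.append(max_so_far[j] < value)
--             max_so_far[j] = max(max_so_far[j], value)
--         out.append(new_row)
--     return out
-- ===== SOURCE B (Python) =====
-- def visible_from_top(data: list[list[int]]) -> list[list[bool]]:
--     # A tree is visible from the top iff it is strictly taller than every tree above it.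
--     return [[all(prev[j] < value for prev in data[:i]) for j, value in enumerate(row)]
--             for i, row in enumerate(data)]
-- ===== Notes on version B (the rewrite author's own statement) =====
-- stated objective: simpler
-- what changed: Replaces A's stateful single pass with a mutated running-max array by a direct definitional double comprehension (a cell is visible iff every cell above it in its column is strictly smaller); Pre_ excludes ragged grids whose row lengths ever increase, where A's running max silently skips columns that shorter earlier rows lack while B's column rescan raises IndexError.
-- outside the precondition, e.g. on visible_from_top([[1, 2], [3], [4, 5]]): A returns [[True, True], [True], [True, True]], B raises IndexError
import Mathlib
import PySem

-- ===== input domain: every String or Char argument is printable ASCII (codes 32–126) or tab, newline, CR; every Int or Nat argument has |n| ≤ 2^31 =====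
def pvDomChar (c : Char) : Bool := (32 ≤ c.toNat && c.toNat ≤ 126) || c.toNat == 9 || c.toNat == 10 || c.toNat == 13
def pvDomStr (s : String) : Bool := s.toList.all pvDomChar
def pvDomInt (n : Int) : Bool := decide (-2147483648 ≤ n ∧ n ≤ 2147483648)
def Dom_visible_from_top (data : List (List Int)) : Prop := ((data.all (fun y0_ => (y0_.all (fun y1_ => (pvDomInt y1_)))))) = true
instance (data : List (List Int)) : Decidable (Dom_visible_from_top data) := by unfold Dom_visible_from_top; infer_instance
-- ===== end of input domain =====

-- B is the definitional double comprehension (a cell is visible iff every cell above it in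
-- its column is strictly smaller), replacing A's stateful pass with a mutated running-max
-- array; simpler, not faster (B is O(n^2*w)).

-- ===== PORT A =====
def visible_from_top (data : List (List Int)) : List (List Bool) :=
  -- out = [len(data[0])*[True]]; max_so_far = data[0].copy()
  let first := data.headD []
  let res := data.tail.foldl
    (fun (st : List (List Bool) × List Int) row =>
      -- new_row = []; for j, value in enumerate(row): …
      let inner := (PySem.List.enumerate row 0).foldl
        (fun (p : List Bool × List Int) jv =>
          let m := PySem.List.pyGetD p.2 jv.1 0   -- max_so_far[j] (raise excluded by Pre_)
          (p.1 ++ [decide (m < jv.2)], PySem.List.pySetD p.2 jv.1 (max m jv.2)))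
        ([], st.2)
      (st.1 ++ [inner.1], inner.2))
    ([List.replicate first.length true], first)
  res.1

-- ===== PORT B =====
def visible_from_top_alt (data : List (List Int)) : List (List Bool) :=
  -- [[all(prev[j] < value for prev in data[:i]) for j, value in enumerate(row)]
  --  for i, row in enumerate(data)]
  (PySem.List.enumerate data 0).map (fun ir =>
    (PySem.List.enumerate ir.2 0).map (fun jv =>
      (PySem.List.slice data none (some ir.1)).all (fun prev =>
        decide (PySem.List.pyGetD prev jv.1 0 < jv.2))))   -- prev[j] (raise excluded by Pre_)

-- ===== PRECONDITION & SPEC =====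
-- Pre_ excludes empty data (A raises IndexError on data[0]) and ragged grids whose row
-- lengths ever increase: on those A either raises (a tail row longer than the first) or
-- returns a value produced by silently skipping the columns a shorter earlier row lacks —
-- an artefact of its in-place running max — while B's column rescan raises IndexError there.
def Pre_visible_from_top (data : List (List Int)) : Prop :=
  data ≠ [] ∧ data.Pairwise (fun a b => b.length ≤ a.length)
instance (data : List (List Int)) : Decidable (Pre_visible_from_top data) := by
  unfold Pre_visible_from_top; infer_instance

def pvWitness_visible_from_top : List (List Int) := [[3, 1], [2, 4], [5, 0]]

def Spec_visible_from_top (data : List (List Int)) (out : List (List Bool)) : Prop := out = visible_from_top_alt data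
instance (data : List (List Int)) (out : List (List Bool)) : Decidable (Spec_visible_from_top data out) := by unfold Spec_visible_from_top; infer_instance

-- ===== CLAIM (what is proved, stated in full; the proofs are below) =====
def Claim_equal_visible_from_top : Prop := ∀ (data : List (List Int)), Dom_visible_from_top data → Pre_visible_from_top data → Spec_visible_from_top data (visible_from_top data)

-- ===== LEMMAS AND PROOFS =====

-- next state of A's column maxima after one row (width w)
def pvNxt (w : Nat) (ms row : List Int) : List Int :=
  (List.range w).map (fun j => if j < row.length then max (ms.getD j 0) (row.getD j 0) else ms.getD j 0)

-- A's rows below the first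
def pvGen (w : Nat) (ms : List Int) : List (List Int) → List (List Bool)
  | [] => []
  | row :: rs =>
    (List.range row.length).map (fun j => decide (ms.getD j 0 < row.getD j 0)) ::
      pvGen w (pvNxt w ms row) rs

-- B's visibility of one row against the rows above it
def pvRowVis (pre : List (List Int)) (row : List Int) : List Bool :=
  (List.range row.length).map (fun j => pre.all (fun prev => decide (prev.getD j 0 < row.getD j 0)))

-- B's rows, with the rows above accumulated explicitly
def pvBGen (pre : List (List Int)) : List (List Int) → List (List Bool)
  | [] => []
  | row :: rs => pvRowVis pre row :: pvBGen (pre ++ [row]) rs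

-- row lengths non-increasing, starting at L
def pvNI (L : Nat) : List (List Int) → Prop
  | [] => True
  | row :: rs => row.length ≤ L ∧ pvNI row.length rs

lemma set_append_right (l1 l2 : List Int) (x : Int) (n : Nat) :
    (l1 ++ l2).set (l1.length + n) x = l1 ++ l2.set n x := by
  induction l1 with
  | nil => simp
  | cons a t ih => simp [Nat.succ_add, ih]

lemma range_map_getD (rest : List Int) :
    (List.range rest.length).map (fun j => rest.getD j 0) = rest := by
  apply List.ext_getElem
  · simp
  · intro i h1 h2
    simp only [List.getElem_map, List.getElem_range, List.getD]
    simp [List.getElem?_eq_getElem (by simpa using h2)]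

lemma pvNxt_nil (rest : List Int) : pvNxt rest.length rest [] = rest := by
  simp only [pvNxt, List.length_nil]
  simpa using range_map_getD rest

lemma pvNxt_cons (r v : Int) (rest row : List Int) :
    pvNxt (rest.length + 1) (r :: rest) (v :: row) = max r v :: pvNxt rest.length rest row := by
  simp only [pvNxt, List.range_succ_eq_map, List.map_cons, List.map_map]
  congr 1
  apply List.map_congr_left
  intro j _
  simp

-- A's inner loop, fully characterised (pre = already-processed columns)
lemma innerA : ∀ (row pre rest : List Int) (acc : List Bool), row.length ≤ rest.length →
    (PySem.List.enumerate row (pre.length : Int)).foldl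
      (fun (p : List Bool × List Int) jv =>
        let m := PySem.List.pyGetD p.2 jv.1 0
        (p.1 ++ [decide (m < jv.2)], PySem.List.pySetD p.2 jv.1 (max m jv.2)))
      (acc, pre ++ rest)
    = (acc ++ (List.range row.length).map (fun j => decide (rest.getD j 0 < row.getD j 0)),
       pre ++ pvNxt rest.length rest row) := by
  intro row
  induction row with
  | nil => intro pre rest acc h; simp [PySem.List.enumerate_nil, pvNxt_nil]
  | cons v row ih =>
    intro pre rest acc h
    match rest with
    | [] => simp at h
    | r :: rest' =>
      rw [PySem.List.enumerate_cons]
      simp only [List.foldl_cons]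
      have hget : PySem.List.pyGetD (pre ++ r :: rest') (pre.length : Int) 0 = r := by
        simp [PySem.List.pyGetD_natCast, List.getD]
      have hset : PySem.List.pySetD (pre ++ r :: rest') (pre.length : Int) (max r v)
          = (pre ++ [max r v]) ++ rest' := by
        simp only [PySem.List.pySetD_natCast]
        have := set_append_right pre (r :: rest') (max r v) 0
        simp only [Nat.add_zero, List.append_assoc, List.singleton_append] at this ⊢
        exact this
      rw [hget, hset]
      have hlen : (pre.length : Int) + 1 = ((pre ++ [max r v]).length : Int) := by
        simp only [List.length_append, List.length_cons, List.length_nil]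
        push_cast
        omega
      rw [hlen, ih (pre ++ [max r v]) rest' (acc ++ [decide (r < v)]) (by simp at h; omega)]
      simp only [List.length_cons, pvNxt_cons, List.append_assoc, List.singleton_append]
      rw [List.range_succ_eq_map, List.map_cons, List.map_map]
      simp [Function.comp_def]

-- A's outer loop
lemma outerA : ∀ (rs : List (List Int)) (out : List (List Bool)) (ms : List Int),
    (∀ r ∈ rs, r.length ≤ ms.length) →
    (rs.foldl
      (fun (st : List (List Bool) × List Int) row =>
        let inner := (PySem.List.enumerate row 0).foldl
          (fun (p : List Bool × List Int) jv =>
            let m := PySem.List.pyGetD p.2 jv.1 0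
            (p.1 ++ [decide (m < jv.2)], PySem.List.pySetD p.2 jv.1 (max m jv.2)))
          ([], st.2)
        (st.1 ++ [inner.1], inner.2))
      (out, ms)).1
    = out ++ pvGen ms.length ms rs := by
  intro rs
  induction rs with
  | nil => intro out ms h; simp [pvGen]
  | cons row rs ih =>
    intro out ms h
    simp only [List.foldl_cons]
    have hinner := innerA row [] ms [] (h row (by simp))
    simp only [List.length_nil, Nat.cast_zero, List.nil_append] at hinner
    rw [hinner]
    have hw : (pvNxt ms.length ms row).length = ms.length := by simp [pvNxt]
    rw [ih (out ++ [(List.range row.length).map (fun j => decide (ms.getD j 0 < row.getD j 0))])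
        (pvNxt ms.length ms row)
        (by intro r hr; rw [hw]; exact h r (by simp [hr]))]
    rw [hw]
    simp [pvGen]

lemma aChar (first : List Int) (rs : List (List Int))
    (h : ∀ r ∈ rs, r.length ≤ first.length) :
    visible_from_top (first :: rs) =
      List.replicate first.length true :: pvGen first.length first rs := by
  simp only [visible_from_top, List.headD_cons, List.tail_cons]
  rw [outerA rs [List.replicate first.length true] first h]
  simp

-- B's inner comprehension
lemma rowVisAux : ∀ (row : List Int) (s : Nat) (pre : List (List Int)),
    (PySem.List.enumerate row (s : Int)).map
      (fun jv => pre.all (fun prev => decide (PySem.List.pyGetD prev jv.1 0 < jv.2)))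
    = (List.range row.length).map
      (fun j => pre.all (fun prev => decide (prev.getD (s + j) 0 < row.getD j 0))) := by
  intro row
  induction row with
  | nil => intro s pre; simp [PySem.List.enumerate_nil]
  | cons v row ih =>
    intro s pre
    rw [PySem.List.enumerate_cons, List.map_cons]
    have h1 : ((s : Int) + 1) = ((s + 1 : Nat) : Int) := by push_cast; omega
    rw [h1, ih (s + 1) pre]
    simp only [List.length_cons, List.range_succ_eq_map, List.map_cons, List.map_map]
    congr 1
    · simp [PySem.List.pyGetD_natCast]
    · apply List.map_congr_left
      intro j _
      have h2 : s + 1 + j = s + (j + 1) := by omega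
      simp [h2]
      rfl

lemma rowVis_eq (pre : List (List Int)) (row : List Int) :
    (PySem.List.enumerate row 0).map
      (fun jv => pre.all (fun prev => decide (PySem.List.pyGetD prev jv.1 0 < jv.2)))
    = pvRowVis pre row := by
  have := rowVisAux row 0 pre
  simpa [pvRowVis] using this

-- B's outer comprehension, with data = pre ++ rest and index pre.length
lemma altOuter : ∀ (rest pre : List (List Int)),
    (PySem.List.enumerate rest (pre.length : Int)).map (fun ir =>
      (PySem.List.enumerate ir.2 0).map (fun jv =>
        (PySem.List.slice (pre ++ rest) none (some ir.1)).all (fun prev =>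
          decide (PySem.List.pyGetD prev jv.1 0 < jv.2))))
    = pvBGen pre rest := by
  intro rest
  induction rest with
  | nil => intro pre; simp [PySem.List.enumerate_nil, pvBGen]
  | cons row rest ih =>
    intro pre
    rw [PySem.List.enumerate_cons, List.map_cons]
    have hsl : PySem.List.slice (pre ++ row :: rest) none (some (pre.length : Int))
        = pre := by
      rw [PySem.List.slice_to_natCast]
      exact List.take_left
    rw [hsl, rowVis_eq]
    have h1 : ((pre.length : Int) + 1) = (((pre ++ [row]).length : Nat) : Int) := by
      simp
    have h2 : pre ++ row :: rest = (pre ++ [row]) ++ rest := by simp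
    rw [h1, h2, ih (pre ++ [row])]
    rfl

lemma altChar (data : List (List Int)) : visible_from_top_alt data = pvBGen [] data := by
  have := altOuter data []
  simpa [visible_from_top_alt] using this

lemma all_decide {A : Type} (l : List A) (p : A → Prop) [DecidablePred p] :
    (l.all fun x => decide (p x)) = decide (∀ x ∈ l, p x) := by
  induction l with
  | nil => simp
  | cons a t ih => simp [List.all_cons, ih]

-- getD of pvNxt below the width
lemma pvNxt_getD (w : Nat) (ms row : List Int) (j : Nat) (hj : j < w) :
    (pvNxt w ms row).getD j 0
      = if j < row.length then max (ms.getD j 0) (row.getD j 0) else ms.getD j 0 := by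
  simp only [pvNxt]
  rw [List.getD_eq_getElem _ _ (by simpa using hj)]
  simp

-- the two generators agree under the running-max invariant and non-increasing lengths
lemma genEq : ∀ (rs : List (List Int)) (pre : List (List Int)) (ms : List Int) (L w : Nat),
    pvNI L rs → L ≤ w → (∀ r ∈ pre, L ≤ r.length) →
    (∀ (j : Nat), j < L → ∀ v : Int, (ms.getD j 0 < v ↔ ∀ r ∈ pre, r.getD j 0 < v)) →
    pvGen w ms rs = pvBGen pre rs := by
  intro rs
  induction rs with
  | nil => intro pre ms L w _ _ _ _; rfl
  | cons row rest ih =>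
    intro pre ms L w hni hw hL hms
    obtain ⟨hrow, hni'⟩ := hni
    simp only [pvGen, pvBGen, pvRowVis]
    congr 1
    · apply List.map_congr_left
      intro j hj
      simp only [List.mem_range] at hj
      have hjL : j < L := lt_of_lt_of_le hj hrow
      have hall : (pre.all fun prev => decide (prev.getD j 0 < row.getD j 0))
          = decide (∀ r ∈ pre, r.getD j 0 < row.getD j 0) :=
        all_decide pre _
      rw [hall]
      exact decide_eq_decide.mpr (hms j hjL (row.getD j 0))
    · apply ih (pre ++ [row]) (pvNxt w ms row) row.length w hni'
        (le_trans hrow hw)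
        (by
          intro r hr
          rcases List.mem_append.mp hr with h1 | h1
          · exact le_trans hrow (hL r h1)
          · simp only [List.mem_singleton] at h1; exact h1 ▸ le_rfl)
      intro j hj v
      have hjw : j < w := lt_of_lt_of_le (lt_of_lt_of_le hj hrow) hw
      rw [pvNxt_getD w ms row j hjw, if_pos hj]
      constructor
      · intro hlt r hr
        rcases List.mem_append.mp hr with h1 | h1
        · exact (hms j (lt_of_lt_of_le hj hrow) v).mp (lt_of_le_of_lt (le_max_left _ _) hlt) r h1
        · simp only [List.mem_singleton] at h1
          subst h1
          exact lt_of_le_of_lt (le_max_right _ _) hlt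
      · intro hall
        have h1 : ms.getD j 0 < v :=
          (hms j (lt_of_lt_of_le hj hrow) v).mpr (fun r hr => hall r (List.mem_append.mpr (Or.inl hr)))
        have h2 : row.getD j 0 < v := hall row (by simp)
        omega

lemma NI_of_pairwise : ∀ (rs : List (List Int)) (L : Nat),
    (∀ r ∈ rs, r.length ≤ L) → rs.Pairwise (fun a b => b.length ≤ a.length) → pvNI L rs := by
  intro rs
  induction rs with
  | nil => intro L _ _; trivial
  | cons row rest ih =>
    intro L hL hp
    rw [List.pairwise_cons] at hp
    exact ⟨hL row (by simp), ih row.length hp.1 hp.2⟩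

-- ===== VERDICT (by name: the statement is the Claim_ definition above) =====
theorem visible_from_top_spec : Claim_equal_visible_from_top := by
  intro data _ hpre
  obtain ⟨hne, hpw⟩ := hpre
  match data with
  | [] => exact absurd rfl hne
  | first :: rs =>
    rw [List.pairwise_cons] at hpw
    show visible_from_top (first :: rs) = visible_from_top_alt (first :: rs)
    rw [altChar, aChar first rs hpw.1]
    show _ = pvBGen [] (first :: rs)
    simp only [pvBGen, List.nil_append]
    congr 1
    · simp [pvRowVis]
    · apply genEq rs [first] first first.length first.length
        (NI_of_pairwise rs first.length hpw.1 hpw.2) le_rfl (by simp)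
      intro j _ v
      simp
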